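-- pv_equiv track=rewrite | github.com/karan2527/CrackProof | crackproof.py | char_pool_size
-- ===== SOURCE A (Python) =====
-- def char_pool_size(pw: str) -> int:
--     pools = [
--         any(c.islower() for c in pw) * 26,
--         any(c.isupper() for c in pw) * 26,
--         any(c.isdigit() for c in pw) * 10,
--     ]
--     # Approx set of printable symbols used commonly
--     symbols = set("!@#$%^&*()-_=+[]{};:'\",.<>/?`~|\\")
--     pools.append((any(c in symbols for c in pw)) * len(symbols))
--     # Include other unicode as 0 (ignored) for simplicity
--     return sum(pools)
-- ===== SOURCE B (Python) =====
-- def char_pool_size(pw: str) -> int: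
--     symbols = "!@#$%^&*()-_=+[]{};:'\",.<>/?`~|\\"
--     lo = up = dg = sy = False
--     for c in pw:
--         lo = lo or c.islower()
--         up = up or c.isupper()
--         dg = dg or c.isdigit()
--         sy = sy or (c in symbols)
--         if lo and up and dg and sy:
--             break
--     return 26 * lo + 26 * up + 10 * dg + len(symbols) * sy
-- ===== Notes on version B (the rewrite author's own statement) =====
-- stated objective: faster
-- what changed: Replaces four independent any(...) scans over the password (plus a set build) with a single pass maintaining four booleans that breaks early once all classes are seen, then a closed-form weighted sum.
import Mathlib
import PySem

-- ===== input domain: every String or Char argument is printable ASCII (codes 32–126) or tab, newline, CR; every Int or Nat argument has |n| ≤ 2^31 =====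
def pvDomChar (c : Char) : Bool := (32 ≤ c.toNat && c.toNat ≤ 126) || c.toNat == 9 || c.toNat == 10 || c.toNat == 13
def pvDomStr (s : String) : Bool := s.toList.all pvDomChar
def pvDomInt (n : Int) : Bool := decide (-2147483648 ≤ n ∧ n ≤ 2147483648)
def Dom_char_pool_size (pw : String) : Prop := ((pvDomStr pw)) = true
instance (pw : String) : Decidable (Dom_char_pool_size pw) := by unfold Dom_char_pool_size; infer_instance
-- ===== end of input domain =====

-- B replaces A's four independent any(...) scans with one early-exiting pass over the
-- string keeping four booleans (objective: simpler, single traversal).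

-- ===== PORT A =====
-- the symbols literal, shared verbatim by both ports
def pvSymbolsStr : String := "!@#$%^&*()-_=+[]{};:'\",.<>/?`~|\\"

def char_pool_size (pw : String) : Int :=
  let cs := pw.toList
  let pools : List Int :=
    [ (if cs.any PySem.Chars.islower then (1 : Int) else 0) * 26,
      (if cs.any PySem.Chars.isupper then (1 : Int) else 0) * 26,
      (if cs.any PySem.Chars.isdigit then (1 : Int) else 0) * 10 ]
  let symbols : PySem.Set Char := PySem.Set.ofList pvSymbolsStr.toList
  let pools := pools ++
    [ (if cs.any (fun c => PySem.Set.contains symbols c) then (1 : Int) else 0)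
        * (PySem.Set.len symbols : Int) ]
  pools.foldl (· + ·) 0

-- ===== PORT B =====
-- B's loop: update the four flags per character, break once all four are set.
-- Python's single-char 'c in symbols' (string membership) is exactly list membership.
def pvBLoop : List Char → Bool → Bool → Bool → Bool → Int
  | [], lo, up, dg, sy =>
      26 * (if lo then (1 : Int) else 0) + 26 * (if up then (1 : Int) else 0)
        + 10 * (if dg then (1 : Int) else 0)
        + (pvSymbolsStr.toList.length : Int) * (if sy then (1 : Int) else 0)
  | c :: rest, lo, up, dg, sy =>
      let lo := lo || PySem.Chars.islower c
      let up := up || PySem.Chars.isupper c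
      let dg := dg || PySem.Chars.isdigit c
      let sy := sy || pvSymbolsStr.toList.contains c
      if lo && up && dg && sy then
        26 * (if lo then (1 : Int) else 0) + 26 * (if up then (1 : Int) else 0)
          + 10 * (if dg then (1 : Int) else 0)
          + (pvSymbolsStr.toList.length : Int) * (if sy then (1 : Int) else 0)
      else
        pvBLoop rest lo up dg sy

def char_pool_size_alt (pw : String) : Int :=
  pvBLoop pw.toList false false false false

-- ===== PRECONDITION & SPEC =====
def Spec_char_pool_size (pw : String) (out : Int) : Prop := out = char_pool_size_alt pw
instance (pw : String) (out : Int) : Decidable (Spec_char_pool_size pw out) := by unfold Spec_char_pool_size; infer_instance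

-- ===== CLAIM (what is proved, stated in full; the proofs are below) =====
def Claim_equal_char_pool_size : Prop := ∀ (pw : String), Dom_char_pool_size pw → Spec_char_pool_size pw (char_pool_size pw)

-- ===== LEMMAS AND PROOFS =====

-- closed form of B's result given the four flags
def pvScore (lo up dg sy : Bool) : Int :=
  26 * (if lo then (1 : Int) else 0) + 26 * (if up then (1 : Int) else 0)
    + 10 * (if dg then (1 : Int) else 0)
    + (pvSymbolsStr.toList.length : Int) * (if sy then (1 : Int) else 0)

theorem pvBLoop_eq (cs : List Char) (lo up dg sy : Bool) :
    pvBLoop cs lo up dg sy =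
      pvScore (lo || cs.any PySem.Chars.islower) (up || cs.any PySem.Chars.isupper)
        (dg || cs.any PySem.Chars.isdigit) (sy || cs.any (pvSymbolsStr.toList.contains ·)) := by
  induction cs generalizing lo up dg sy with
  | nil => simp [pvBLoop, pvScore]
  | cons c rest ih =>
      simp only [pvBLoop, List.any_cons]
      split
      · next h =>
          simp only [Bool.and_eq_true] at h
          obtain ⟨⟨⟨h1, h2⟩, h3⟩, h4⟩ := h
          have m1 : lo = true ∨ PySem.Chars.islower c = true ∨ ∃ x ∈ rest, PySem.Chars.islower x = true := by
            rcases Bool.or_eq_true_iff.mp h1 with h' | h'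
            · exact Or.inl h'
            · exact Or.inr (Or.inl h')
          have m2 : up = true ∨ PySem.Chars.isupper c = true ∨ ∃ x ∈ rest, PySem.Chars.isupper x = true := by
            rcases Bool.or_eq_true_iff.mp h2 with h' | h'
            · exact Or.inl h'
            · exact Or.inr (Or.inl h')
          have m3 : dg = true ∨ PySem.Chars.isdigit c = true ∨ ∃ x ∈ rest, PySem.Chars.isdigit x = true := by
            rcases Bool.or_eq_true_iff.mp h3 with h' | h'
            · exact Or.inl h'
            · exact Or.inr (Or.inl h')
          have m4 : sy = true ∨ c ∈ pvSymbolsStr.toList ∨ ∃ x ∈ rest, x ∈ pvSymbolsStr.toList := by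
            rcases Bool.or_eq_true_iff.mp h4 with h' | h'
            · exact Or.inl h'
            · exact Or.inr (Or.inl (by simpa using h'))
          simp [pvScore, h1, h2, h3, m1, m2, m3, m4]
          intro hs hm
          rcases Bool.or_eq_true_iff.mp h4 with h' | h'
          · simp [h'] at hs
          · exact absurd (by simpa using h') hm
      · rw [ih]
        simp [Bool.or_assoc]

theorem pvSet_contains_eq (c : Char) :
    PySem.Set.contains (PySem.Set.ofList pvSymbolsStr.toList) c = pvSymbolsStr.toList.contains c := by
  simp [PySem.Set.contains, PySem.Set.mem_ofList]

theorem pvSet_len : (PySem.Set.len (PySem.Set.ofList pvSymbolsStr.toList) : Int) = (pvSymbolsStr.toList.length : Int) := by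
  decide

-- ===== VERDICT (by name: the statement is the Claim_ definition above) =====
theorem char_pool_size_spec : Claim_equal_char_pool_size := by
  intro pw _
  show char_pool_size pw = char_pool_size_alt pw
  unfold char_pool_size char_pool_size_alt
  rw [pvBLoop_eq]
  simp only [Bool.false_or]
  have hc : (pw.toList.any fun c => PySem.Set.contains (PySem.Set.ofList pvSymbolsStr.toList) c)
      = pw.toList.any (pvSymbolsStr.toList.contains ·) := by
    apply PySem.List.any_congr_mem
    intro x _
    exact pvSet_contains_eq x
  simp only [pvScore, hc, pvSet_len]
  cases pw.toList.any PySem.Chars.islower <;> cases pw.toList.any PySem.Chars.isupper <;>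
    cases pw.toList.any PySem.Chars.isdigit <;>
    cases pw.toList.any (pvSymbolsStr.toList.contains ·) <;> simp
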